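-- pv_equiv track=rewrite | github.com/LifesLike/algorithm-study | 7월 1주차/신고 결과 받기/solution.py | solution
-- ===== SOURCE A (Python) =====
-- def solution(id_list, reports, k):
--     block = {id: 0 for id in id_list}
--     report_result = {id: [] for id in id_list}
--
--     for report in set(reports):
--         src, dst = report.split()
--         report_result[src].append(dst)
--         block[dst] += 1
--
--     answer = []
--     for id in id_list:
--         mail = 0
--         for dst in report_result[id]:
--             if block[dst] >= k:
--                 mail += 1
--         answer.append(mail)
--
--     return answer
-- ===== SOURCE B (Python) =====
-- def solution(id_list, reports, k):
--     # inverted index: reported user -> list of reporters (over deduplicated reports)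
--     reported_by = {}
--     for report in set(reports):
--         src, dst = report.split()
--         reported_by.setdefault(dst, []).append(src)
--
--     mail_count = {id: 0 for id in id_list}
--     for srcs in reported_by.values():
--         if len(srcs) >= k:
--             for src in srcs:
--                 mail_count[src] += 1
--
--     return [mail_count[id] for id in id_list]
-- ===== Notes on version B (the rewrite author's own statement) =====
-- stated objective: alternative
-- what changed: B builds the inverse index (reported user -> list of reporters) instead of A's reporter -> reported map plus per-id rescan, and propagates mail counts group-by-group from each over-threshold reported user to its reporters.
import Mathlib
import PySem

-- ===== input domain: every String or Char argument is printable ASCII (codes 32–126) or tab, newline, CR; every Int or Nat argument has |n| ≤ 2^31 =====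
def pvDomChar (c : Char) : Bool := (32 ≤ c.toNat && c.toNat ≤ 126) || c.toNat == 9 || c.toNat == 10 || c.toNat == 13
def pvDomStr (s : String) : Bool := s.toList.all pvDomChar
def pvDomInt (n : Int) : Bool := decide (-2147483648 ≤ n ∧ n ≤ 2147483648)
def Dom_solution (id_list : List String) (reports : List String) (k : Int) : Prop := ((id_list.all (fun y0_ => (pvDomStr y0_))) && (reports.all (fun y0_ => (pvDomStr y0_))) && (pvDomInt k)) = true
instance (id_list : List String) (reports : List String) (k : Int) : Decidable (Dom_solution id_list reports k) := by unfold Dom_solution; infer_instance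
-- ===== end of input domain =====

-- B replaces A's reporter→reported map (and per-id rescan against block counts) by the inverse
-- index reported-user→reporters, pushing mail counts from each over-threshold group to its
-- reporters; same asymptotic cost (objective: alternative).

-- ===== PORT A =====
-- `report_result[src].append(dst)` / `block[dst] += 1` are ported with Dict.modify, exact when the
-- key is present (Pre_ guarantees that; Python raises KeyError otherwise). The for-loop over
-- `set(reports)` is a fold over PySem.Set.ofList; the final answer is order-independent.
def solution (id_list : List String) (reports : List String) (k : Int) : List Int :=
  let block0 : PySem.Dict String Int := id_list.foldl (fun d i => d.insert i 0) PySem.Dict.empty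
  let rr0 : PySem.Dict String (List String) := id_list.foldl (fun d i => d.insert i []) PySem.Dict.empty
  let st := (PySem.Set.ofList reports).foldl
      (fun (st : PySem.Dict String (List String) × PySem.Dict String Int) r =>
        match PySem.Str.split₀ r with
        | [src, dst] => (st.1.modify src [] (· ++ [dst]), st.2.modify dst 0 (· + 1))
        | _ => st) (rr0, block0)
  id_list.foldl (fun ans i =>
    ans ++ [(st.1.getD i []).foldl (fun mail dst => if k ≤ st.2.getD dst 0 then mail + 1 else mail) 0]) []

-- ===== PORT B =====
-- `reported_by.setdefault(dst, []).append(src)` is ported as Dict.modify dst [] (· ++ [src]), its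
-- exact net effect; `mail_count[src] += 1` as Dict.modify (exact: Pre_ puts src in id_list).
def solution_alt (id_list : List String) (reports : List String) (k : Int) : List Int :=
  let rb : PySem.Dict String (List String) := (PySem.Set.ofList reports).foldl
      (fun d r =>
        match PySem.Str.split₀ r with
        | [] => d
        | [_] => d
        | [src, dst] => d.modify dst [] (· ++ [src])
        | _ :: _ :: _ :: _ => d) PySem.Dict.empty
  let mail0 : PySem.Dict String Int := id_list.foldl (fun d i => d.insert i 0) PySem.Dict.empty
  let mail := rb.values.foldl
      (fun m srcs =>
        if k ≤ (srcs.length : Int) then srcs.foldl (fun m s => m.modify s 0 (· + 1)) m else m) mail0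
  id_list.map (fun i => mail.getD i 0)

-- ===== PRECONDITION & SPEC =====
-- Pre_ is exactly A's return domain: every report must split into exactly two tokens, both keys of
-- the dicts (members of id_list); otherwise Python A raises ValueError/KeyError.
def Pre_solution (id_list : List String) (reports : List String) (k : Int) : Prop :=
  ∀ r ∈ reports, (PySem.Str.split₀ r).length = 2 ∧ ∀ t ∈ PySem.Str.split₀ r, t ∈ id_list
instance (id_list : List String) (reports : List String) (k : Int) : Decidable (Pre_solution id_list reports k) := by unfold Pre_solution; infer_instance

def pvWitness_solution : List String × List String × Int :=
  (["muzi", "frodo", "apeach", "neo"], ["muzi frodo", "apeach frodo", "frodo neo", "muzi neo", "apeach muzi"], 2)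

def Spec_solution (id_list : List String) (reports : List String) (k : Int) (out : List Int) : Prop := out = solution_alt id_list reports k
instance (id_list : List String) (reports : List String) (k : Int) (out : List Int) : Decidable (Spec_solution id_list reports k out) := by unfold Spec_solution; infer_instance

-- ===== CLAIM (what is proved, stated in full; the proofs are below) =====
def Claim_equal_solution : Prop := ∀ (id_list : List String) (reports : List String) (k : Int), Dom_solution id_list reports k → Pre_solution id_list reports k → Spec_solution id_list reports k (solution id_list reports k)

-- ===== LEMMAS AND PROOFS =====

-- parsing helper (proofs only): what one loop iteration extracts from a report
def pvParse (r : String) : Option (String × String) :=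
  match PySem.Str.split₀ r with
  | [s, d] => some (s, d)
  | _ => none

-- A's loop over the report set, rephrased as a fold over the parsed pairs
lemma pvFoldA (l : List String)
    (init : PySem.Dict String (List String) × PySem.Dict String Int) :
    l.foldl (fun st r =>
        match PySem.Str.split₀ r with
        | [src, dst] => (st.1.modify src [] (· ++ [dst]), st.2.modify dst 0 (· + 1))
        | _ => st) init
      = (l.filterMap pvParse).foldl
          (fun st p => (st.1.modify p.1 [] (· ++ [p.2]), st.2.modify p.2 0 (· + 1))) init := by
  induction l generalizing init with
  | nil => rfl
  | cons h t ih =>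
    simp only [pvParse] at ih ⊢
    rcases hs : PySem.Str.split₀ h with _ | ⟨s, _ | ⟨d, _ | _⟩⟩ <;>
      simp [hs, ih]

-- B's loop over the report set, rephrased likewise
lemma pvFoldB (l : List String) (init : PySem.Dict String (List String)) :
    l.foldl (fun d r =>
        match PySem.Str.split₀ r with
        | [] => d
        | [_] => d
        | [src, dst] => d.modify dst [] (· ++ [src])
        | _ :: _ :: _ :: _ => d) init
      = (l.filterMap pvParse).foldl (fun d p => d.modify p.2 [] (· ++ [p.1])) init := by
  induction l generalizing init with
  | nil => rfl
  | cons h t ih =>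
    simp only [pvParse] at ih ⊢
    rcases hs : PySem.Str.split₀ h with _ | ⟨s, _ | ⟨d, _ | _⟩⟩ <;>
      simp [hs, ih]

-- the {id: c for id in id_list} initializer looks up to c everywhere (default is c too)
lemma pvGetDInit {ν : Type} (c : ν) (L : List String) (D : PySem.Dict String ν)
    (h : ∀ x, D.getD x c = c) (x : String) :
    (L.foldl (fun d i => d.insert i c) D).getD x c = c := by
  induction L generalizing D with
  | nil => exact h x
  | cons hd t ih =>
    simp only [List.foldl_cons]
    exact ih _ (fun y => by rw [PySem.Dict.getD_insert]; split <;> simp [h])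

-- B's mail loop: final lookup = initial lookup + the per-group contributions
lemma pvMailFold (k : Int) (vs : List (List String)) (m : PySem.Dict String Int) (i : String) :
    (vs.foldl (fun m srcs =>
        if k ≤ (srcs.length : Int) then srcs.foldl (fun m s => m.modify s 0 (· + 1)) m else m)
      m).getD i 0
    = m.getD i 0 + (vs.map (fun srcs =>
        if k ≤ (srcs.length : Int) then (srcs.count i : Int) else 0)).sum := by
  induction vs generalizing m with
  | nil => simp
  | cons hd t ih =>
    simp only [List.foldl_cons, List.map_cons, List.sum_cons, ih]
    split
    · rw [PySem.Dict.getD_foldl_modify_add_one]; ring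
    · ring

-- counting over ps splits into a sum over any Nodup list of keys covering the second components
lemma pvCountPartition (ps : List (String × String)) (ds : List String) (Q : String × String → Bool)
    (hnd : ds.Nodup) (hmem : ∀ p ∈ ps, p.2 ∈ ds) :
    ps.countP Q = (ds.map (fun d => (ps.filter (fun p => p.2 == d)).countP Q)).sum := by
  induction ds generalizing ps with
  | nil =>
    cases ps with
    | nil => simp
    | cons p t => exact absurd (hmem p (by simp)) (by simp)
  | cons d ds' ih =>
    have hsplit := List.countP_eq_countP_filter_add ps Q (fun p => p.2 == d)
    have hrest : ∀ p ∈ ps.filter (fun p => !(p.2 == d)), p.2 ∈ ds' := by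
      intro p hp
      rcases List.mem_filter.mp hp with ⟨hp1, hp2⟩
      rcases List.mem_cons.mp (hmem p hp1) with h | h
      · simp [h] at hp2
      · exact h
    rw [List.map_cons, List.sum_cons, hsplit, ih _ hnd.of_cons hrest]
    congr 1
    refine congrArg List.sum (List.map_congr_left ?_)
    intro d' hd'
    have hne : d' ≠ d := fun he => (List.nodup_cons.mp hnd).1 (he ▸ hd')
    rw [List.filter_filter]
    refine congrArg (List.countP Q) (List.filter_congr ?_)
    intro p _
    by_cases h : p.2 = d' <;> simp [h, hne]

-- B's reported_by dict: lookup = the reporters of x, in report-set order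
lemma pvRbGetD (ps : List (String × String)) (D : PySem.Dict String (List String)) (x : String) :
    (ps.foldl (fun d p => d.modify p.2 [] (· ++ [p.1])) D).getD x []
      = D.getD x [] ++ (ps.filter (fun p => p.2 == x)).map Prod.fst := by
  induction ps generalizing D with
  | nil => simp
  | cons p t ih =>
    simp only [List.foldl_cons, ih, List.filter_cons]
    rw [PySem.Dict.getD_modify]
    by_cases h : x = p.2 <;> simp [h, List.append_assoc, beq_iff_eq]
    · simp [Ne.symm h]

-- A's block dict: lookup = how often x was reported (over the deduplicated reports)
lemma pvBlGetD (ps : List (String × String)) (D : PySem.Dict String Int) (x : String) :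
    (ps.foldl (fun d p => d.modify p.2 0 (· + 1)) D).getD x 0
      = D.getD x 0 + ((ps.map Prod.snd).count x : Int) := by
  induction ps generalizing D with
  | nil => simp
  | cons p t ih =>
    simp only [List.foldl_cons, ih, List.map_cons]
    rw [PySem.Dict.getD_modify]
    by_cases h : x = p.2 <;> simp [h, List.count_cons, Ne.symm, eq_comm] <;> ring

-- normal form of one per-id value: A's rescan count = B's per-group sum
lemma pvMain (ps : List (String × String)) (k : Int) (i : String) :
    ((ps.filter (fun p => p.1 == i)).map (fun p => p.2)).foldl
        (fun mail dst => if k ≤ ((ps.map Prod.snd).count dst : Int) then mail + 1 else mail) 0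
      = ((PySem.Set.ofList (ps.map Prod.snd)).map (fun d =>
          if k ≤ (((ps.filter (fun p => p.2 == d)).map Prod.fst).length : Int)
          then (((ps.filter (fun p => p.2 == d)).map Prod.fst).count i : Int) else 0)).sum := by
  have hcnt : ∀ x, (ps.map Prod.snd).count x = ps.countP (fun p => p.2 == x) := by
    intro x; rw [List.count_eq_countP, List.countP_map]; rfl
  rw [PySem.List.foldl_ite_add_one (p := fun dst => k ≤ ((ps.map Prod.snd).count dst : Int))]
  rw [List.countP_map, List.countP_filter]
  rw [pvCountPartition ps (PySem.Set.ofList (ps.map Prod.snd)) _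
        (PySem.Set.nodup_ofList _)
        (fun p hp => (PySem.Set.mem_ofList _ _).mpr (List.mem_map_of_mem hp))]
  rw [Nat.cast_list_sum, List.map_map, zero_add]
  refine congrArg List.sum (List.map_congr_left ?_)
  intro d hd
  simp only [Function.comp_apply, List.length_map, ← List.countP_eq_length_filter,
    List.count_eq_countP, List.countP_map]
  by_cases hk : k ≤ ((ps.countP (fun p => p.2 == d) : Nat) : Int)
  · rw [if_pos hk]
    refine congrArg Nat.cast (List.countP_congr ?_)
    intro p hp
    obtain ⟨hpps, hpd⟩ := List.mem_filter.mp hp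
    have hd2 : p.2 = d := by simpa using hpd
    have hkp : k ≤ ((ps.countP ((fun x => x == p.2) ∘ Prod.snd) : Nat) : Int) := by
      rw [hd2]; exact hk
    simp [hkp]
  · rw [if_neg hk]
    have hz : (ps.filter (fun p => p.2 == d)).countP
        (fun p => decide (k ≤ ((ps.countP ((fun x => x == p.2) ∘ Prod.snd) : Nat) : Int))
          && (p.1 == i)) = 0 := by
      rw [List.countP_eq_zero]
      intro p hp
      obtain ⟨hpps, hpd⟩ := List.mem_filter.mp hp
      have hd2 : p.2 = d := by simpa using hpd
      have hlt : ¬ k ≤ ((ps.countP ((fun x => x == p.2) ∘ Prod.snd) : Nat) : Int) := by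
        rw [hd2]; exact hk
      simp [hlt]
    simp [hz]

theorem solution_spec_aux (id_list reports : List String) (k : Int)
    (_hpre : Pre_solution id_list reports k) :
    solution id_list reports k = solution_alt id_list reports k := by
  unfold solution solution_alt
  dsimp only
  rw [pvFoldA, pvFoldB]
  rw [PySem.List.foldl_prod_mk
        (f := fun (st : PySem.Dict String (List String)) (p : String × String) =>
          st.modify p.1 [] (· ++ [p.2]))
        (g := fun (st : PySem.Dict String Int) (p : String × String) =>
          st.modify p.2 0 (· + 1))]
  rw [PySem.List.foldl_append_singleton_eq_map, List.nil_append]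
  refine List.map_congr_left ?_
  intro i hi
  have hnod : ((((PySem.Set.ofList reports).filterMap pvParse)).foldl
      (fun d p => d.modify p.2 [] (· ++ [p.1])) PySem.Dict.empty).keys.Nodup :=
    PySem.Dict.nodup_keys_foldl_modify_key _ Prod.snd [] (fun _ p => (· ++ [p.1])) _ (by simp)
  rw [PySem.Dict.getD_foldl_modify_append]
  rw [pvGetDInit [] id_list PySem.Dict.empty (fun x => by simp), List.nil_append]
  rw [pvMailFold, pvGetDInit 0 id_list PySem.Dict.empty (fun x => by simp), zero_add]
  rw [PySem.Dict.values_eq_map_keys _ hnod [], PySem.Dict.keys_foldl_modify_key, List.map_map]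
  have hb0 : ∀ x, ((id_list.foldl (fun d i => d.insert i (0 : Int))
      PySem.Dict.empty).getD x 0) = 0 := fun x => pvGetDInit 0 id_list _ (fun y => by simp) x
  simp only [pvBlGetD, hb0, zero_add, pvRbGetD, PySem.Dict.getD_empty, List.nil_append,
    Function.comp_apply]
  have hupd : PySem.Set.update (PySem.Dict.empty (κ := String) (ν := List String)).keys
      ((((PySem.Set.ofList reports).filterMap pvParse)).map Prod.snd)
      = PySem.Set.ofList ((((PySem.Set.ofList reports).filterMap pvParse)).map Prod.snd) := rfl
  rw [hupd]
  exact pvMain _ k i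

-- ===== VERDICT (by name: the statement is the Claim_ definition above) =====
theorem solution_spec : Claim_equal_solution := by
  intro id_list reports k _ hpre
  exact solution_spec_aux id_list reports k hpre
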